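-- pv_equiv track=rewrite | github.com/forthcoming/algorithm | leet_code.py | leet_code_48
-- ===== SOURCE A (Python) =====
-- def leet_code_48(matrix):  # 信号发射与接收(单调队列)
--     def _do(x, y, stack):
--         while stack and matrix[x][y] > stack[-1]:
--             result[x][y] += 1
--             stack.pop()
--         if stack:
--             result[x][y] += 1
--             if matrix[x][y] == stack[-1]:
--                 stack.pop()
--         stack.append(matrix[x][y])
--
--     m, n = len(matrix), len(matrix[0])
--     result = [[0] * n for _ in range(m)]
--     for i in range(m):
--         stack_east = []
--         for j in range(n):
--             _do(i, j, stack_east)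
--     for j in range(n):
--         stack_south = []
--         for i in range(m):
--             _do(i, j, stack_south)
--     return result
-- ===== SOURCE B (Python) =====
-- def leet_code_48(matrix):
--     n = len(matrix[0])
--     out = []
--     for i, row in enumerate(matrix):
--         out_row = []
--         for j in range(n):
--             h = row[j]
--             c = 0
--             cur = None
--             for k in range(j - 1, -1, -1):
--                 v = row[k]
--                 if cur is None or v > cur:
--                     c += 1
--                     cur = v
--                 if v >= h:
--                     break
--             cur = None
--             for k in range(i - 1, -1, -1):
--                 v = matrix[k][j]
--                 if cur is None or v > cur:
--                     c += 1
--                     cur = v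
--                 if v >= h:
--                     break
--             out_row.append(c)
--         out.append(out_row)
--     return out
-- ===== Notes on version B (the rewrite author's own statement) =====
-- stated objective: simpler
-- what changed: A fills a shared result grid with two stateful monotonic-stack passes (row pass then column pass, mutating the grid and a stack via an inner _do helper); B computes each cell independently with two direct backward scans (left along the row, then up the column) keeping only a running blocker height, with no stacks and no mutation.
import Mathlib
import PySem

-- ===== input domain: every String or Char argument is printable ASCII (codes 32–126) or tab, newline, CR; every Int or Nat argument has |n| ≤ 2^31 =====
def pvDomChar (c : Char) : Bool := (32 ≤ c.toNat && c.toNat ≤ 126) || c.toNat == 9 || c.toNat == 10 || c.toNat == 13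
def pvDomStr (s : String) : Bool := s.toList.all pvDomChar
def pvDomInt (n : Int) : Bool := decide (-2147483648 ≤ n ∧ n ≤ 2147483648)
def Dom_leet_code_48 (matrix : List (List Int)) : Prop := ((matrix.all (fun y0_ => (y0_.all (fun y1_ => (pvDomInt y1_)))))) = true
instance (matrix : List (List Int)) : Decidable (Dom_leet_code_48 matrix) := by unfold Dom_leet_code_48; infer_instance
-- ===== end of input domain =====

-- B replaces A's two mutating monotonic-stack passes by a per-cell backward scan (simpler, no mutation); equal return values on Pre_.

-- ===== PORT A =====
-- matrix[x][y]: always in range under Pre_, so getD is exact there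
def mget (mx : List (List Int)) (x y : Nat) : Int := (mx.getD x []).getD y 0

-- result[x][y] += 1
def bump1 (g : List (List Int)) (x y : Nat) : List (List Int) :=
  g.modify x (fun row => row.modify y (· + 1))

-- the while-loop of _do: pop while stack nonempty and h > top (stack head = Python stack[-1])
def pvDoWhile (h : Int) (x y : Nat) : List Int → List (List Int) → List (List Int) × List Int
  | [], res => (res, [])
  | t :: r, res => if h > t then pvDoWhile h x y r (bump1 res x y) else (res, t :: r)

-- _do(x, y, stack) acting on (result, stack)
def pvDo (mx : List (List Int)) (x y : Nat) (res : List (List Int)) (st : List Int) :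
    List (List Int) × List Int :=
  let h := mget mx x y
  match pvDoWhile h x y st res with
  | (res1, []) => (res1, [h])
  | (res1, t :: r) =>
      let res2 := bump1 res1 x y
      if h = t then (res2, h :: r) else (res2, h :: t :: r)

def leet_code_48 (matrix : List (List Int)) : List (List Int) :=
  let m := matrix.length
  let n := (matrix.headD []).length
  let res0 := (List.range m).map (fun _ => List.replicate n (0 : Int))
  let res1 := (List.range m).foldl (fun res i =>
      ((List.range n).foldl (fun p j => pvDo matrix i j p.1 p.2) (res, ([] : List Int))).1) res0
  (List.range n).foldl (fun res j =>
      ((List.range m).foldl (fun p i => pvDo matrix i j p.1 p.2) (res, ([] : List Int))).1) res1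

-- ===== PORT B =====
-- the backward scan: list argument is the reversed prefix (nearest element first);
-- cur is the running blocker, counted when strictly higher, stop at the first ≥ h
def scanCnt (h : Int) : Option Int → List Int → Int
  | _, [] => 0
  | cur, v :: rest =>
      let hit := match cur with | none => true | some c => decide (c < v)
      let c : Int := if hit then 1 else 0
      if h ≤ v then c else c + scanCnt h (if hit then some v else cur) rest

def leet_code_48_alt (matrix : List (List Int)) : List (List Int) :=
  let n := (matrix.headD []).length
  (PySem.List.enumerate matrix).map (fun p =>
    (List.range n).map (fun j =>
      let h := p.2.getD j 0
      scanCnt h none (p.2.take j).reverse +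
      scanCnt h none ((matrix.take p.1.toNat).map (fun r => r.getD j 0)).reverse))

-- ===== PRECONDITION & SPEC =====
-- Pre_ excludes exactly the inputs where Python A raises IndexError: the empty matrix
-- (matrix[0]) and matrices with a row shorter than the first row (matrix[x][y], y < n).
def Pre_leet_code_48 (matrix : List (List Int)) : Prop :=
  matrix ≠ [] ∧ ∀ row ∈ matrix, (matrix.headD []).length ≤ row.length
instance (matrix : List (List Int)) : Decidable (Pre_leet_code_48 matrix) := by
  unfold Pre_leet_code_48; infer_instance

def pvWitness_leet_code_48 : List (List Int) := [[1, 2], [3, 1]]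

def Spec_leet_code_48 (matrix : List (List Int)) (out : List (List Int)) : Prop := out = leet_code_48_alt matrix
instance (matrix : List (List Int)) (out : List (List Int)) : Decidable (Spec_leet_code_48 matrix out) := by unfold Spec_leet_code_48; infer_instance

-- ===== CLAIM (what is proved, stated in full; the proofs are below) =====
def Claim_equal_leet_code_48 : Prop := ∀ (matrix : List (List Int)), Dom_leet_code_48 matrix → Pre_leet_code_48 matrix → Spec_leet_code_48 matrix (leet_code_48 matrix)

-- ===== LEMMAS AND PROOFS =====

-- result[x][y] += c, and the shape predicate
def addC (g : List (List Int)) (x y : Nat) (c : Int) : List (List Int) :=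
  g.modify x (fun row => row.modify y (· + c))

def Shaped (m n : Nat) (g : List (List Int)) : Prop :=
  g.length = m ∧ ∀ row ∈ g, row.length = n

-- number of pops of the while loop
def popN (h : Int) : List Int → Nat
  | [] => 0
  | t :: r => if h > t then popN h r + 1 else 0

-- total increment _do adds to result[x][y] given the stack
def cellCnt (h : Int) (st : List Int) : Int :=
  (popN h st : Int) + (if st.dropWhile (fun t => decide (t < h)) = [] then 0 else 1)

-- the stack after pops and the equal-top pop (before pushing h)
def strip (h : Int) (st : List Int) : List Int :=
  match st.dropWhile (fun t => decide (t < h)) with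
  | [] => []
  | t :: r => if h = t then r else t :: r

-- the monotonic stack contents as a function of the reversed prefix
def recordsO (cur : Option Int) : List Int → List Int
  | [] => []
  | v :: rest =>
      let hit := match cur with | none => true | some c => decide (c < v)
      if hit then v :: recordsO (some v) rest else recordsO cur rest

-- per-cell contribution of the row pass / column pass
def rowVal (r : List Int) (j : Nat) : Int :=
  cellCnt (r.getD j 0) (recordsO none (r.take j).reverse)

def colVal (mx : List (List Int)) (i j : Nat) : Int :=
  rowVal (mx.map (fun r => r.getD j 0)) i



theorem addC_zero (g : List (List Int)) (x y : Nat) : addC g x y 0 = g := by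
  have h1 : ∀ (row : List Int), row.modify y (· + (0:Int)) = row := by
    intro row
    have : (fun v : Int => v + 0) = id := by funext v; simp
    rw [this, List.modify_id]
  simp only [addC, h1]
  have : (fun row : List Int => row) = id := rfl
  rw [this, List.modify_id]

theorem addC_addC (g : List (List Int)) (x y : Nat) (c d : Int) :
    addC (addC g x y c) x y d = addC g x y (c + d) := by
  apply List.ext_getElem
  · simp [addC]
  · intro i h1 h2
    simp only [addC, List.getElem_modify]
    split_ifs with hx
    · apply List.ext_getElem
      · simp
      · intro j _ _
        simp only [List.getElem_modify]
        split_ifs with hy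
        · ring
        · rfl
    · rfl

theorem shaped_addC {m n : Nat} {g : List (List Int)} (hs : Shaped m n g) (x y : Nat) (c : Int) :
    Shaped m n (addC g x y c) := by
  obtain ⟨hl, hr⟩ := hs
  refine ⟨by simpa [addC] using hl, ?_⟩
  intro row hrow
  simp only [addC] at hrow
  rw [List.mem_iff_getElem] at hrow
  obtain ⟨i, hi, hrow⟩ := hrow
  rw [List.getElem_modify] at hrow
  split_ifs at hrow
  · subst hrow
    simp only [List.length_modify]
    exact hr _ (List.getElem_mem _)
  · subst hrow; exact hr _ (List.getElem_mem _)

theorem mget_addC {m n : Nat} {g : List (List Int)} (hs : Shaped m n g)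
    {x y : Nat} (hx : x < m) (hy : y < n) (c : Int) (x' y' : Nat) :
    mget (addC g x y c) x' y' = mget g x' y' + (if x' = x ∧ y' = y then c else 0) := by
  obtain ⟨hl, hr⟩ := hs
  subst hl
  simp only [mget, addC, List.getD_eq_getElem?_getD, List.getElem?_modify]
  by_cases hxx : x = x'
  · subst hxx
    have hy' : y < g[x].length := by rw [hr _ (List.getElem_mem hx)]; exact hy
    rw [List.getElem?_eq_getElem hx]
    by_cases hyy : y = y'
    · subst hyy
      simp [List.getElem?_eq_getElem hy']
    · simp [hyy]
      exact fun h => absurd h.symm hyy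
  · simp [hxx]
    exact fun h1 _ => absurd h1.symm hxx

theorem bump1_eq (g : List (List Int)) (x y : Nat) : bump1 g x y = addC g x y 1 := rfl



theorem pvDoWhile_eq (h : Int) (x y : Nat) (st : List Int) (res : List (List Int)) :
    pvDoWhile h x y st res
      = (addC res x y (popN h st : Int), st.dropWhile (fun t => decide (t < h))) := by
  induction st generalizing res with
  | nil => simp [pvDoWhile, popN, addC_zero]
  | cons t r ih =>
    by_cases ht : t < h
    · rw [pvDoWhile, if_pos ht, ih, bump1_eq, addC_addC]
      simp [popN, ht]
      ring_nf
    · rw [pvDoWhile, if_neg ht]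
      simp [popN, ht, addC_zero]

theorem pvDo_eq (mx : List (List Int)) (x y : Nat) (res : List (List Int)) (st : List Int) :
    pvDo mx x y res st
      = (addC res x y (cellCnt (mget mx x y) st), mget mx x y :: strip (mget mx x y) st) := by
  simp only [pvDo, pvDoWhile_eq]
  cases hdw : st.dropWhile (fun t => decide (t < mget mx x y)) with
  | nil =>
    simp [cellCnt, strip, hdw]
  | cons t r =>
    simp only [cellCnt, strip, hdw, bump1_eq, addC_addC]
    split_ifs <;> simp_all

theorem recordsO_gt {L : List Int} {c x : Int} (hx : x ∈ recordsO (some c) L) : c < x := by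
  induction L generalizing c with
  | nil => simp [recordsO] at hx
  | cons v rest ih =>
    simp only [recordsO] at hx
    split_ifs at hx with hv
    · simp only [decide_eq_true_eq] at hv
      rcases List.mem_cons.mp hx with h1 | h1
      · omega
      · exact lt_trans hv (ih h1)
    · exact ih hx

theorem recordsO_filter (L : List Int) (c : Int) :
    recordsO (some c) L = (recordsO none L).filter (fun x => decide (c < x)) := by
  induction L generalizing c with
  | nil => rfl
  | cons v rest ih =>
    simp only [recordsO, if_true, List.filter_cons]
    by_cases hv : c < v
    · rw [if_pos (by simpa using hv), if_pos (by simpa using hv)]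
      have : ∀ x ∈ recordsO (some v) rest, decide (c < x) = true := by
        intro x hx
        simpa using lt_trans hv (recordsO_gt hx)
      rw [List.filter_eq_self.mpr this]
    · rw [if_neg (by simpa using hv), if_neg (by simpa using hv), ih c, ih v,
        List.filter_filter]
      apply List.filter_congr
      intro x _
      by_cases hcx : c < x
      · have hvx : v < x := by omega
        simp [hcx, hvx]
      · simp [hcx]

theorem recordsO_pairwise (L : List Int) (cur : Option Int) :
    (recordsO cur L).Pairwise (· < ·) := by
  induction L generalizing cur with
  | nil => simp [recordsO]
  | cons v rest ih =>
    simp only [recordsO]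
    split_ifs with hv
    · exact List.Pairwise.cons (fun x hx => recordsO_gt hx) (ih (some v))
    · exact ih cur

theorem strip_pairwise {h : Int} {st : List Int} (hp : st.Pairwise (· < ·)) :
    strip h st = st.filter (fun x => decide (h < x)) := by
  induction st with
  | nil => simp [strip]
  | cons t r ih =>
    have hpr := List.Pairwise.of_cons hp
    have hall : ∀ x ∈ r, t < x := fun x hx => List.rel_of_pairwise_cons hp hx
    by_cases ht : t < h
    · rw [strip, List.dropWhile_cons_of_pos (by simpa using ht), List.filter_cons_of_neg (by simp; omega)]
      rw [← ih hpr, strip]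
    · rw [strip, List.dropWhile_cons_of_neg (by simpa using ht)]
      show (if h = t then r else t :: r) = _
      by_cases hth : h = t
      · rw [if_pos hth, List.filter_cons_of_neg (by simp; omega)]
        symm
        apply List.filter_eq_self.mpr
        intro x hx
        have := hall x hx
        simp; omega
      · rw [if_neg hth, List.filter_cons_of_pos (by simp; omega)]
        congr 1
        symm
        apply List.filter_eq_self.mpr
        intro x hx
        have := hall x hx
        simp; omega

theorem records_step (h : Int) (L : List Int) :
    h :: strip h (recordsO none L) = recordsO none (h :: L) := by
  have : recordsO none (h :: L) = h :: recordsO (some h) L := by simp [recordsO]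
  rw [this, strip_pairwise (recordsO_pairwise L none), recordsO_filter]

theorem cellCnt_cons_ge {h v : Int} (T : List Int) (hv : h ≤ v) : cellCnt h (v :: T) = 1 := by
  simp only [cellCnt, popN]
  rw [if_neg (by omega), List.dropWhile_cons_of_neg (by simpa using by omega)]
  simp

theorem cellCnt_cons_lt {h v : Int} (T : List Int) (hv : v < h) :
    cellCnt h (v :: T) = 1 + cellCnt h T := by
  simp only [cellCnt, popN]
  rw [if_pos (by omega), List.dropWhile_cons_of_pos (by simpa using hv)]
  push_cast
  ring

theorem scanCnt_eq_cellCnt (h : Int) (L : List Int) (cur : Option Int)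
    (hc : ∀ c, cur = some c → c < h) :
    scanCnt h cur L = cellCnt h (recordsO cur L) := by
  induction L generalizing cur with
  | nil => cases cur <;> rfl
  | cons v rest ih =>
    cases cur with
    | none =>
      have hs : scanCnt h none (v :: rest)
          = if h ≤ v then 1 else 1 + scanCnt h (some v) rest := by
        simp [scanCnt]
      have hr : recordsO none (v :: rest) = v :: recordsO (some v) rest := by
        simp [recordsO]
      rw [hs, hr]
      by_cases hv : h ≤ v
      · rw [if_pos hv, cellCnt_cons_ge _ hv]
      · rw [if_neg hv, cellCnt_cons_lt _ (by omega),
          ih (some v) (fun c hc' => by cases hc'; omega)]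
    | some c =>
      have hch : c < h := hc c rfl
      by_cases hcv : c < v
      · have hs : scanCnt h (some c) (v :: rest)
            = if h ≤ v then 1 else 1 + scanCnt h (some v) rest := by
          simp [scanCnt, hcv]
        have hr : recordsO (some c) (v :: rest) = v :: recordsO (some v) rest := by
          simp [recordsO, hcv]
        rw [hs, hr]
        by_cases hv : h ≤ v
        · rw [if_pos hv, cellCnt_cons_ge _ hv]
        · rw [if_neg hv, cellCnt_cons_lt _ (by omega),
            ih (some v) (fun c hc' => by cases hc'; omega)]
      · have hs : scanCnt h (some c) (v :: rest) = scanCnt h (some c) rest := by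
          simp [scanCnt, hcv]
          exact fun hv => absurd hv (by omega)
        have hr : recordsO (some c) (v :: rest) = recordsO (some c) rest := by
          simp [recordsO, hcv]
        rw [hs, hr, ih (some c) (fun c' hc' => by cases hc'; omega)]

theorem take_rev_succ (r : List Int) (k : Nat) (hk : k < r.length) :
    (r.take (k+1)).reverse = r.getD k 0 :: (r.take k).reverse := by
  rw [List.take_add_one, List.getElem?_eq_getElem hk, List.getD_eq_getElem _ _ hk]
  simp

def addRow (mx : List (List Int)) (i : Nat) (res : List (List Int)) (k : Nat) : List (List Int) :=
  (List.range k).foldl (fun r j => addC r i j (rowVal (mx.getD i []) j)) res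

def addCol (mx : List (List Int)) (j : Nat) (res : List (List Int)) (k : Nat) : List (List Int) :=
  (List.range k).foldl (fun r i => addC r i j (colVal mx i j)) res

theorem addRow_succ (mx : List (List Int)) (i : Nat) (res : List (List Int)) (k : Nat) :
    addRow mx i res (k+1) = addC (addRow mx i res k) i k (rowVal (mx.getD i []) k) := by
  simp only [addRow, List.range_succ, List.foldl_append, List.foldl_cons, List.foldl_nil]

theorem addCol_succ (mx : List (List Int)) (j : Nat) (res : List (List Int)) (k : Nat) :
    addCol mx j res (k+1) = addC (addCol mx j res k) k j (colVal mx k j) := by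
  simp only [addCol, List.range_succ, List.foldl_append, List.foldl_cons, List.foldl_nil]

theorem mget_col (mx : List (List Int)) (j k : Nat) (hk : k < mx.length) :
    (mx.map (fun r => r.getD j 0)).getD k 0 = mget mx k j := by
  rw [List.getD_eq_getElem _ _ (by simpa using hk), List.getElem_map, mget,
    List.getD_eq_getElem _ _ hk]

theorem innerRow (mx : List (List Int)) {n : Nat} (i : Nat)
    (hrow : n ≤ (mx.getD i []).length) (res : List (List Int)) :
    ∀ k, k ≤ n →
    (List.range k).foldl (fun p j => pvDo mx i j p.1 p.2) (res, ([] : List Int))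
      = (addRow mx i res k, recordsO none (((mx.getD i []).take k).reverse)) := by
  intro k
  induction k with
  | zero => intro _; rfl
  | succ k ih =>
    intro hk
    rw [List.range_succ, List.foldl_append, ih (by omega)]
    simp only [List.foldl_cons, List.foldl_nil, pvDo_eq]
    rw [Prod.mk.injEq]
    refine ⟨?_, ?_⟩
    · rw [addRow_succ]
      rfl
    · rw [records_step, show mget mx i k = (mx.getD i []).getD k 0 from rfl,
        ← take_rev_succ _ _ (by omega)]

theorem innerCol (mx : List (List Int)) {m : Nat} (hm : mx.length = m) (j : Nat)
    (res : List (List Int)) :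
    ∀ k, k ≤ m →
    (List.range k).foldl (fun p i => pvDo mx i j p.1 p.2) (res, ([] : List Int))
      = (addCol mx j res k, recordsO none (((mx.map (fun r => r.getD j 0)).take k).reverse)) := by
  intro k
  induction k with
  | zero => intro _; rfl
  | succ k ih =>
    intro hk
    rw [List.range_succ, List.foldl_append, ih (by omega)]
    simp only [List.foldl_cons, List.foldl_nil, pvDo_eq]
    have hkl : k < mx.length := by omega
    have hcol : mget mx k j = (mx.map (fun r => r.getD j 0)).getD k 0 := (mget_col mx j k hkl).symm
    rw [Prod.mk.injEq]
    refine ⟨?_, ?_⟩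
    · rw [addCol_succ]
      congr 1
      rw [colVal, rowVal, hcol]
    · rw [records_step, hcol, ← take_rev_succ _ _ (by simpa using hkl)]

theorem shaped_addRow {m n : Nat} {mx res : List (List Int)} (hs : Shaped m n res)
    (i : Nat) (k : Nat) : Shaped m n (addRow mx i res k) := by
  induction k with
  | zero => exact hs
  | succ k ih =>
    rw [addRow_succ]
    exact shaped_addC ih _ _ _

theorem shaped_addCol {m n : Nat} {mx res : List (List Int)} (hs : Shaped m n res)
    (j : Nat) (k : Nat) : Shaped m n (addCol mx j res k) := by
  induction k with
  | zero => exact hs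
  | succ k ih =>
    rw [addCol_succ]
    exact shaped_addC ih _ _ _

theorem mget_addRow {m n : Nat} {mx res : List (List Int)} (hs : Shaped m n res)
    {i : Nat} (him : i < m) (x y : Nat) (k : Nat) : k ≤ n →
    mget (addRow mx i res k) x y
      = mget res x y + (if x = i ∧ y < k then rowVal (mx.getD i []) y else 0) := by
  induction k with
  | zero => intro _; simp [addRow]
  | succ k ih =>
    intro hk
    have hkn : k < n := by omega
    have hkn' : k ≤ n := by omega
    rw [addRow_succ, mget_addC (m := m) (n := n) (x := i) (y := k) (shaped_addRow hs i k) him hkn, ih hkn']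
    split_ifs <;>
      first
        | ring1
        | (exfalso; omega)
        | (obtain ⟨rfl, rfl⟩ := (by assumption : x = i ∧ y = k); ring1)

theorem mget_addCol {m n : Nat} {mx res : List (List Int)} (hs : Shaped m n res)
    {j : Nat} (hjn : j < n) (x y : Nat) (k : Nat) : k ≤ m →
    mget (addCol mx j res k) x y
      = mget res x y + (if y = j ∧ x < k then colVal mx x j else 0) := by
  induction k with
  | zero => intro _; simp [addCol]
  | succ k ih =>
    intro hk
    have hkm : k < m := by omega
    have hkm' : k ≤ m := by omega
    rw [addCol_succ, mget_addC (m := m) (n := n) (x := k) (y := j) (shaped_addCol hs j k) hkm hjn, ih hkm']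
    split_ifs <;>
      first
        | ring1
        | (exfalso; omega)
        | (obtain ⟨rfl, rfl⟩ := (by assumption : x = k ∧ y = j); ring1)

theorem outerRow (mx : List (List Int)) {m n : Nat} (hm : mx.length = m)
    (hrows : ∀ row ∈ mx, n ≤ row.length) :
    ∀ K, K ≤ m → ∀ res, Shaped m n res →
      Shaped m n ((List.range K).foldl (fun res i =>
          ((List.range n).foldl (fun p j => pvDo mx i j p.1 p.2) (res, ([] : List Int))).1) res)
      ∧ ∀ x y, x < m → y < n →
        mget ((List.range K).foldl (fun res i =>
            ((List.range n).foldl (fun p j => pvDo mx i j p.1 p.2) (res, ([] : List Int))).1) res) x y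
          = mget res x y + (if x < K then rowVal (mx.getD x []) y else 0) := by
  intro K
  induction K with
  | zero => intro _ res hs; exact ⟨hs, by simp⟩
  | succ K ih =>
    intro hK res hs
    obtain ⟨ihs, ihv⟩ := ih (by omega) res hs
    have hrowK : n ≤ (mx.getD K []).length := by
      apply hrows
      rw [List.getD_eq_getElem _ _ (by omega)]
      exact List.getElem_mem _
    rw [List.range_succ, List.foldl_append]
    simp only [List.foldl_cons, List.foldl_nil]
    rw [innerRow mx K hrowK _ n (le_refl n)]
    constructor
    · exact shaped_addRow ihs K n
    · intro x y hx hy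
      have hKm : K < m := by omega
      rw [mget_addRow (m := m) (n := n) (i := K) ihs hKm x y n (le_refl n), ihv x y hx hy]
      split_ifs <;>
        first
          | ring1
          | (exfalso; omega)
          | (obtain ⟨rfl, -⟩ := (by assumption : x = K ∧ y < n); ring1)

theorem outerCol (mx : List (List Int)) {m n : Nat} (hm : mx.length = m) :
    ∀ K, K ≤ n → ∀ res, Shaped m n res →
      Shaped m n ((List.range K).foldl (fun res j =>
          ((List.range m).foldl (fun p i => pvDo mx i j p.1 p.2) (res, ([] : List Int))).1) res)
      ∧ ∀ x y, x < m → y < n →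
        mget ((List.range K).foldl (fun res j =>
            ((List.range m).foldl (fun p i => pvDo mx i j p.1 p.2) (res, ([] : List Int))).1) res) x y
          = mget res x y + (if y < K then colVal mx x y else 0) := by
  intro K
  induction K with
  | zero => intro _ res hs; exact ⟨hs, by simp⟩
  | succ K ih =>
    intro hK res hs
    obtain ⟨ihs, ihv⟩ := ih (by omega) res hs
    rw [List.range_succ, List.foldl_append]
    simp only [List.foldl_cons, List.foldl_nil]
    rw [innerCol mx hm K _ m (le_refl m)]
    constructor
    · exact shaped_addCol ihs K m
    · intro x y hx hy
      have hKn : K < n := by omega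
      rw [mget_addCol (m := m) (n := n) (j := K) ihs hKn x y m (le_refl m), ihv x y hx hy]
      split_ifs <;>
        first
          | ring1
          | (exfalso; omega)
          | (obtain ⟨rfl, -⟩ := (by assumption : y = K ∧ x < m); ring1)

-- ===== VERDICT (by name: the statement is the Claim_ definition above) =====
theorem mget_eq_getElem {g : List (List Int)}
    {x y : Nat} (hx' : x < g.length)
    (hy' : y < g[x].length) : g[x][y] = mget g x y := by
  rw [mget, List.getD_eq_getElem _ _ hx', List.getD_eq_getElem _ _ hy']

theorem leet_code_48_spec : Claim_equal_leet_code_48 := by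
  unfold Claim_equal_leet_code_48
  intro mx _ hpre
  obtain ⟨hne, hrows⟩ := hpre
  unfold Spec_leet_code_48
  have hs0 : Shaped mx.length (mx.headD []).length
      ((List.range mx.length).map (fun _ => List.replicate (mx.headD []).length (0 : Int))) := by
    constructor
    · simp
    · intro row hrow
      simp only [List.mem_map] at hrow
      obtain ⟨_, _, hrow⟩ := hrow
      rw [← hrow, List.length_replicate]
  have h0 : ∀ x y, mget ((List.range mx.length).map
      (fun _ => List.replicate (mx.headD []).length (0 : Int))) x y = 0 := by
    intro x y
    rw [mget]
    have hx' : ∃ k, ((List.range mx.length).map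
        (fun _ => List.replicate (mx.headD []).length (0 : Int))).getD x []
          = List.replicate k (0 : Int) := by
      by_cases hx : x < mx.length
      · exact ⟨_, by rw [List.getD_eq_getElem _ _ (by rw [List.length_map, List.length_range]; exact hx), List.getElem_map]⟩
      · exact ⟨0, by rw [List.getD_eq_default _ _ (by rw [List.length_map, List.length_range]; omega)]; rfl⟩
    obtain ⟨k, hk⟩ := hx'
    rw [hk, List.getD_eq_getElem?_getD, List.getElem?_replicate]
    split <;> rfl
  obtain ⟨hs1, hv1⟩ := outerRow mx rfl hrows mx.length le_rfl _ hs0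
  obtain ⟨hs2, hv2⟩ := outerCol mx (n := (mx.headD []).length) rfl (mx.headD []).length le_rfl _ hs1
  have hAeq : leet_code_48 mx = (List.range (mx.headD []).length).foldl (fun res j =>
      ((List.range mx.length).foldl (fun p i => pvDo mx i j p.1 p.2) (res, ([] : List Int))).1)
      ((List.range mx.length).foldl (fun res i =>
        ((List.range (mx.headD []).length).foldl (fun p j => pvDo mx i j p.1 p.2)
          (res, ([] : List Int))).1)
        ((List.range mx.length).map (fun _ => List.replicate (mx.headD []).length (0 : Int)))) := rfl
  have hsF : Shaped mx.length (mx.headD []).length (leet_code_48 mx) := by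
    rw [hAeq]; exact hs2
  have hvF : ∀ x y, x < mx.length → y < (mx.headD []).length →
      mget (leet_code_48 mx) x y
        = rowVal (mx.getD x []) y + colVal mx x y := by
    intro x y hx hy
    rw [hAeq, hv2 x y hx hy, hv1 x y hx hy, h0, if_pos hy, if_pos hx]
    ring
  apply List.ext_getElem
  · rw [hsF.1]
    simp [leet_code_48_alt, PySem.List.length_enumerate]
  · intro x hx1 hx2
    have hxm : x < mx.length := by
      have := hsF.1
      omega
    have hBrow : (leet_code_48_alt mx)[x]'hx2
        = (List.range (mx.headD []).length).map (fun j =>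
            scanCnt (mx[x].getD j 0) none (mx[x].take j).reverse +
            scanCnt (mx[x].getD j 0) none
              ((mx.take x).map (fun r => r.getD j 0)).reverse) := by
      simp only [leet_code_48_alt]
      rw [List.getElem_map, PySem.List.getElem_enumerate]
      simp
    apply List.ext_getElem
    · rw [hBrow, List.length_map, List.length_range]
      exact hsF.2 _ (List.getElem_mem _)
    · intro y hy1 hy2
      have hyn : y < (mx.headD []).length := by
        have := hsF.2 _ (List.getElem_mem hx1)
        omega
      rw [mget_eq_getElem hx1 hy1, hvF x y hxm hyn,
        List.getElem_of_eq hBrow hy2, List.getElem_map, List.getElem_range]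
      have hrowx : mx.getD x [] = mx[x] := List.getD_eq_getElem _ _ hxm
      have hcol : (mx.map (fun r => r.getD y 0)).getD x 0 = mx[x].getD y 0 := by
        rw [mget_col mx y x hxm, mget, hrowx]
      rw [rowVal, hrowx, colVal, rowVal, hcol,
        ← scanCnt_eq_cellCnt _ _ none (by intro c hc; cases hc),
        ← scanCnt_eq_cellCnt _ _ none (by intro c hc; cases hc),
        List.map_take]
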